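-- pv_equiv track=rewrite | github.com/jordan-sussman/repo-pulse | repo_pulse.py | get_group_dir
-- ===== SOURCE A (Python) =====
-- def get_group_dir(filepath: str, prefix_counts: dict[str, int]) -> str:
--     parts = filepath.split("/")
--     if len(parts) <= 1:
--         return "(root)"
--
--     for i in range(len(parts) - 2, -1, -1):
--         parent = "/".join(parts[:i+1])
--         if prefix_counts.get(parent, 0) >= 2:
--             return parent
--
--     return parts[0]
-- ===== SOURCE B (Python) =====
-- def get_group_dir(filepath: str, prefix_counts: dict[str, int]) -> str:
--     best = None
--     first = None
--     prefix = ""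
--     for ch in filepath:
--         if ch == "/":
--             if first is None:
--                 first = prefix
--             if prefix_counts.get(prefix, 0) >= 2:
--                 best = prefix
--         prefix += ch
--     if first is None:
--         return "(root)"
--     return best if best is not None else first
-- ===== Notes on version B (the rewrite author's own statement) =====
-- stated objective: alternative
-- what changed: Replaces split('/') plus repeated '/'.join of prefix lists with a single forward character scan that grows the prefix incrementally and keeps the first component and the last (longest) ancestor whose count is >= 2.
import Mathlib
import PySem

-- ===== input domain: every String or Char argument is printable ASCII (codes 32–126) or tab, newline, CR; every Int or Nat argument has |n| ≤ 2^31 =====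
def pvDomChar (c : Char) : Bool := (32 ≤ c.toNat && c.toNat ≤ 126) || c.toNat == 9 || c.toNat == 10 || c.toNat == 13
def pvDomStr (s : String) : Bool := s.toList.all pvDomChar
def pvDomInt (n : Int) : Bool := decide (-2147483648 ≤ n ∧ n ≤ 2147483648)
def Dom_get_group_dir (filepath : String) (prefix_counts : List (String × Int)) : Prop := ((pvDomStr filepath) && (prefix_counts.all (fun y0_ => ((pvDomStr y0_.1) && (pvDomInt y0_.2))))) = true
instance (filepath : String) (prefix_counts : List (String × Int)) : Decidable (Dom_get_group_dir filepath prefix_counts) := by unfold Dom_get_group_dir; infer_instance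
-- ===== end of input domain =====

-- B replaces split('/') + repeated '/'.join of prefix lists by one forward character scan
-- that grows the prefix incrementally (objective: alternative, same observable behaviour).

-- shared guard: `prefix_counts.get(p, 0) >= 2` (identical line in both Pythons)
def hasTwo (prefix_counts : List (String × Int)) (p : List Char) : Bool :=
  2 ≤ PySem.Dict.getD (PySem.Dict.mk prefix_counts) (String.ofList p) 0

-- ===== PORT A =====
-- the `for i in range(len(parts)-2, -1, -1): … return parent` early-return loop
def aLoop (prefix_counts : List (String × Int)) (parts : List (List Char)) :
    List Int → Option (List Char)
  | [] => none
  | i :: rest =>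
    let parent := PySem.Chars.join ['/'] (PySem.List.slice parts none (some (i + 1)))
    if hasTwo prefix_counts parent then some parent
    else aLoop prefix_counts parts rest

def get_group_dir (filepath : String) (prefix_counts : List (String × Int)) : String :=
  let parts := PySem.Chars.splitOn filepath.toList ['/']
  if parts.length ≤ 1 then "(root)"
  else
    match aLoop prefix_counts parts (PySem.List.pyRange ((parts.length : Int) - 2) (-1) (-1)) with
    | some parent => String.ofList parent
    | none => String.ofList ((PySem.List.pyGet? parts 0).getD [])  -- parts[0]; parts ≠ [] here, default unreachable

-- ===== PORT B =====
-- loop body: state = (best, first, prefix), one step per character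
def bStep (prefix_counts : List (String × Int))
    (st : Option (List Char) × Option (List Char) × List Char) (ch : Char) :
    Option (List Char) × Option (List Char) × List Char :=
  let (best, first, pre) := st
  if ch = '/' then
    ((if hasTwo prefix_counts pre then some pre else best),
     (if first.isNone then some pre else first),
     pre ++ [ch])
  else (best, first, pre ++ [ch])

def get_group_dir_alt (filepath : String) (prefix_counts : List (String × Int)) : String :=
  let st := filepath.toList.foldl (bStep prefix_counts) (none, none, ([] : List Char))
  match st.2.1 with
  | none => "(root)"
  | some fs => String.ofList (st.1.getD fs)

-- ===== PRECONDITION & SPEC =====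
def Spec_get_group_dir (filepath : String) (prefix_counts : List (String × Int)) (out : String) : Prop := out = get_group_dir_alt filepath prefix_counts
instance (filepath : String) (prefix_counts : List (String × Int)) (out : String) : Decidable (Spec_get_group_dir filepath prefix_counts out) := by unfold Spec_get_group_dir; infer_instance

-- ===== CLAIM (what is proved, stated in full; the proofs are below) =====
def Claim_equal_get_group_dir : Prop := ∀ (filepath : String) (prefix_counts : List (String × Int)), Dom_get_group_dir filepath prefix_counts → Spec_get_group_dir filepath prefix_counts (get_group_dir filepath prefix_counts)

-- ===== LEMMAS AND PROOFS =====

-- the natural structural recursion computing s.split("/")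
def splitRec : List Char → List (List Char)
  | [] => [[]]
  | c :: rest => if c = '/' then [] :: splitRec rest else (splitRec rest).modifyHead (c :: ·)

-- the ascending list of prefixes of cs that end just before a '/'
def cands : List Char → List (List Char)
  | [] => []
  | c :: rest => (if c = '/' then [[]] else []) ++ (cands rest).map (c :: ·)

theorem splitRec_ne_nil (cs : List Char) : splitRec cs ≠ [] := by
  induction cs with
  | nil => simp [splitRec]
  | cons c rest ih =>
    simp only [splitRec]
    split_ifs <;> simp_all [List.modifyHead]
    cases h : splitRec rest <;> simp_all

theorem splitOn_go_eq (fuel : Nat) : ∀ (l cur : List Char) (acc : List (List Char)),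
    l.length < fuel →
    PySem.Chars.splitOn.go ['/'] fuel l cur acc
      = acc.reverse ++ (splitRec l).modifyHead (cur.reverse ++ ·) := by
  induction fuel with
  | zero => intro l cur acc h; omega
  | succ n ih =>
    intro l cur acc h
    cases l with
    | nil => simp [PySem.Chars.splitOn.go, splitRec]
    | cons c rest =>
      rw [PySem.Chars.splitOn.go]
      by_cases hc : c = '/'
      · subst hc
        simp only [List.isPrefixOf, BEq.rfl, Bool.and_self, if_pos, List.length_cons,
          List.length_nil, List.drop_succ_cons, List.drop_zero]
        rw [ih rest [] (List.reverse cur :: acc) (by simpa using h)]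
        simp [splitRec, List.modifyHead]
        cases hs : splitRec rest <;> simp [hs]
      · have hpre : List.isPrefixOf ['/'] (c :: rest) = false := by
          simp [List.isPrefixOf]; intro hh; exact hc (by simpa using hh.symm) |>.elim
        rw [if_neg (by simp [hpre])]
        rw [ih rest (c :: cur) acc (by simpa using h)]
        simp only [splitRec, if_neg hc]
        congr 1
        cases hs : splitRec rest with
        | nil => exact absurd hs (splitRec_ne_nil rest)
        | cons hd tl => simp [List.modifyHead]

theorem splitOn_eq (cs : List Char) :
    PySem.Chars.splitOn cs ['/'] = splitRec cs := by
  rw [PySem.Chars.splitOn, splitOn_go_eq (cs.length + 1) cs [] [] (by omega)]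
  cases h : splitRec cs with
  | nil => exact absurd h (splitRec_ne_nil cs)
  | cons hd tl => simp [List.modifyHead]

theorem length_splitRec (cs : List Char) :
    (splitRec cs).length = (cands cs).length + 1 := by
  induction cs with
  | nil => simp [splitRec, cands]
  | cons c rest ih => simp only [splitRec, cands]; split_ifs <;> simp_all

theorem join_modifyHead (c : Char) (parts : List (List Char)) (h : parts ≠ []) :
    PySem.Chars.join ['/'] (parts.modifyHead (c :: ·)) = c :: PySem.Chars.join ['/'] parts := by
  cases parts with
  | nil => exact absurd rfl h
  | cons hd tl =>
    cases tl with
    | nil => simp [List.modifyHead, PySem.Chars.join_singleton]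
    | cons y t => simp [List.modifyHead, PySem.Chars.join_cons_cons]

theorem joins_eq (cs : List Char) :
    (List.range (cands cs).length).map
        (fun k => PySem.Chars.join ['/'] ((splitRec cs).take (k + 1)))
      = cands cs := by
  induction cs with
  | nil => simp [splitRec, cands]
  | cons c rest ih =>
    have hne : splitRec rest ≠ [] := splitRec_ne_nil rest
    have htk : ∀ k : Nat, (splitRec rest).take (k + 1) ≠ [] := by
      intro k
      cases hs : splitRec rest with
      | nil => exact absurd hs hne
      | cons a t => simp
    by_cases hc : c = '/'
    · subst hc
      have h1 : splitRec ('/' :: rest) = [] :: splitRec rest := by simp [splitRec]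
      have h2 : cands ('/' :: rest) = [] :: (cands rest).map ('/' :: ·) := by simp [cands]
      rw [h1, h2, List.length_cons, List.length_map, List.range_succ_eq_map, List.map_cons,
        List.cons_eq_cons]
      refine ⟨by simp [PySem.Chars.join_singleton], ?_⟩
      conv_rhs => rw [← ih]
      rw [List.map_map, List.map_map]
      apply List.map_congr_left
      intro k hk
      simp only [Function.comp_apply, Nat.succ_eq_add_one, List.take_succ_cons]
      cases ht : (splitRec rest).take (k + 1) with
      | nil => exact absurd ht (htk k)
      | cons a t => simp [PySem.Chars.join_cons_cons]
    · have h1 : splitRec (c :: rest) = (splitRec rest).modifyHead (c :: ·) := by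
        simp [splitRec, hc]
      have h2 : cands (c :: rest) = (cands rest).map (c :: ·) := by simp [cands, hc]
      rw [h1, h2, List.length_map]
      conv_rhs => rw [← ih]
      rw [List.map_map]
      apply List.map_congr_left
      intro k hk
      simp only [Function.comp_apply]
      have hsw : (List.modifyHead (c :: ·) (splitRec rest)).take (k + 1)
          = ((splitRec rest).take (k + 1)).modifyHead (c :: ·) := by
        cases hs : splitRec rest with
        | nil => exact absurd hs hne
        | cons a t => simp [List.modifyHead]
      rw [hsw, join_modifyHead _ _ (htk k)]

theorem foldB_spec (pc : List (String × Int)) (cs : List Char) :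
    ∀ (p : List Char) (best first : Option (List Char)),
    cs.foldl (bStep pc) (best, first, p)
      = ((((cands cs).map (p ++ ·)).reverse.find? (hasTwo pc)).or best,
         first.or (((cands cs).map (p ++ ·)).head?),
         p ++ cs) := by
  induction cs with
  | nil => intro p best first; simp [cands]
  | cons ch rest ih =>
    intro p best first
    by_cases hc : ch = '/'
    · subst hc
      have h2 : cands ('/' :: rest) = [] :: (cands rest).map ('/' :: ·) := by simp [cands]
      rw [List.foldl_cons]
      show List.foldl (bStep pc)
          ((if hasTwo pc p then some p else best),
           (if first.isNone then some p else first), p ++ ['/']) rest = _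
      rw [ih, h2]
      simp only [List.map_cons, List.map_map, List.reverse_cons, List.find?_append,
        List.append_nil, List.head?_cons]
      refine Prod.ext ?_ (Prod.ext ?_ ?_) <;> simp only
      · rw [show ((cands rest).map ((fun x => p ++ x) ∘ fun x => '/' :: x))
            = (cands rest).map ((p ++ ['/']) ++ ·) from by
            apply List.map_congr_left; intro d _; simp]
        rw [Option.or_assoc]
        congr 1
        cases h : hasTwo pc p <;> simp [List.find?, h]
      · cases first <;> simp
      · simp
    · have h2 : cands (ch :: rest) = (cands rest).map (ch :: ·) := by simp [cands, hc]
      rw [List.foldl_cons,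
        show bStep pc (best, first, p) ch = (best, first, p ++ [ch]) from by simp [bStep, hc]]
      rw [ih, h2]
      simp only [List.map_map]
      rw [show ((cands rest).map ((fun x => p ++ x) ∘ fun x => ch :: x))
          = (cands rest).map ((p ++ [ch]) ++ ·) from by
          apply List.map_congr_left; intro d _; simp]
      simp

theorem aLoop_eq (pc : List (String × Int)) (parts : List (List Char)) (il : List Int) :
    aLoop pc parts il
      = (il.map (fun i =>
          PySem.Chars.join ['/'] (PySem.List.slice parts none (some (i + 1))))).find?
          (hasTwo pc) := by
  induction il with
  | nil => simp [aLoop]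
  | cons i rest ih =>
    simp only [aLoop, List.map_cons, List.find?_cons]
    cases h : hasTwo pc (PySem.Chars.join ['/'] (PySem.List.slice parts none (some (i + 1)))) <;>
      simp [h, ih]

theorem pyRange_desc (m : Nat) :
    PySem.List.pyRange (m : Int) (-1) (-1)
      = (List.range (m + 1)).map (fun k : Nat => (m : Int) - (k : Int)) := by
  rw [PySem.List.pyRange]
  rw [if_neg (by norm_num : ¬ (-1 : Int) = 0)]
  rw [if_neg (by norm_num : ¬ (0 : Int) < -1)]
  rw [if_pos (by omega : (-1 : Int) < m)]
  rw [show ((m : Int) - -1 + - -1 - 1) / - -1 = ((m + 1 : Nat) : Int) from by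
    push_cast; ring_nf; norm_num]
  rw [Int.toNat_natCast]
  show List.map (fun k : Nat => (m : Int) + -1 * (k : Int)) (List.range (m + 1)) = _
  simp only [neg_one_mul, ← sub_eq_add_neg]

theorem map_range_rev {α : Type} (f : Nat → α) (n : Nat) :
    ((List.range n).map f).reverse = (List.range n).map (fun k => f (n - 1 - k)) := by
  induction n generalizing f with
  | zero => simp
  | succ n ih =>
    conv_rhs => rw [List.range_succ_eq_map]
    rw [List.range_succ, List.map_append, List.reverse_append, ih f]
    simp only [List.map_nil, List.reverse_cons, List.reverse_nil,
      List.nil_append, List.singleton_append, List.map_cons, List.map_map,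
      Nat.add_sub_cancel, Nat.sub_zero]
    rw [List.cons_eq_cons]
    refine ⟨rfl, ?_⟩
    apply List.map_congr_left
    intro k hk
    simp only [Function.comp_apply]
    congr 1
    omega

-- ===== VERDICT (by name: the statement is the Claim_ definition above) =====
theorem get_group_dir_spec : Claim_equal_get_group_dir := by
  intro f pc _
  show get_group_dir f pc = get_group_dir_alt f pc
  unfold get_group_dir get_group_dir_alt
  rw [splitOn_eq, foldB_spec pc f.toList [] none none]
  simp only [List.nil_append, List.map_id', Option.or_none, Option.none_or]
  cases hcs : cands f.toList with
  | nil =>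
    have hl := length_splitRec f.toList
    rw [hcs] at hl
    simp only [List.length_nil, Nat.zero_add] at hl
    rw [if_pos (by omega)]
    simp
  | cons d ds =>
    have hl := length_splitRec f.toList
    rw [hcs] at hl
    simp only [List.length_cons] at hl
    rw [if_neg (by omega)]
    have hm : ((splitRec f.toList).length : Int) - 2 = ((ds.length : Nat) : Int) := by
      rw [hl]; push_cast; ring
    rw [hm, pyRange_desc, aLoop_eq, List.map_map]
    have hL : (List.range (ds.length + 1)).map
          ((fun i => PySem.Chars.join ['/'] (PySem.List.slice (splitRec f.toList) none (some (i + 1))))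
            ∘ (fun k : Nat => (ds.length : Int) - (k : Int)))
        = ((List.range (ds.length + 1)).map
            (fun k => PySem.Chars.join ['/'] ((splitRec f.toList).take (k + 1)))).reverse := by
      rw [map_range_rev, Nat.add_sub_cancel]
      apply List.map_congr_left
      intro k hk
      simp only [Function.comp_apply]
      rw [List.mem_range] at hk
      rw [show ((ds.length : Int) - k + 1) = ((ds.length - k + 1 : Nat) : Int) from by
        push_cast [Nat.cast_sub (by omega : k ≤ ds.length)]; ring]
      rw [PySem.List.slice_to _ (by positivity)]
      rw [Int.toNat_natCast]
    rw [hL]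
    have hcl : (cands f.toList).length = ds.length + 1 := by rw [hcs]; simp
    rw [← hcl, joins_eq, hcs]
    cases hf : ((d :: ds).reverse).find? (hasTwo pc) with
    | some p => simp
    | none =>
      simp only [List.head?_cons]
      -- fallback: parts[0] = d
      have hj := joins_eq f.toList
      rw [hcl, List.range_succ_eq_map, List.map_cons, hcs] at hj
      have hd : PySem.Chars.join ['/'] ((splitRec f.toList).take 1) = d :=
        (List.cons_eq_cons.mp hj).1
      cases hp : splitRec f.toList with
      | nil => exact absurd hp (splitRec_ne_nil f.toList)
      | cons h0 t0 =>
        rw [hp] at hd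
        simp only [List.take_succ_cons, List.take_zero, PySem.Chars.join_singleton] at hd
        simp [PySem.List.pyGet?, PySem.List.pyIdx?, hd]
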